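-- pv_equiv track=rewrite | github.com/Groteska7/python_labs | src/lab04/io_text_csv.py | sorted_word_counts
-- ===== SOURCE A (Python) =====
-- def sorted_word_counts(freq: dict[str, int]) -> list[tuple[str, int]]:
--     if not freq:
--         raise ValueError("Словарь частот не может быть пустым")
--     if not isinstance(freq, dict):
--         raise TypeError("Аргумент freq должен быть словарем")
--     for key, val in freq.items():
--         if not isinstance(key, str):
--             raise TypeError(f"Ключи словаря должны быть строками")
--         if not isinstance(val, int):
--             raise TypeError(f"Значения словаря должны быть целыми числами")
--         if val < 0:
--             raise ValueError(f"Частота не может быть отрицательной")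
--     return sorted(freq.items(), key=lambda kv: (-kv[1], kv[0]))
-- ===== SOURCE B (Python) =====
-- def sorted_word_counts(freq: dict[str, int]) -> list[tuple[str, int]]:
--     if not freq:
--         raise ValueError("Словарь частот не может быть пустым")
--     buckets: dict[int, list[str]] = {}
--     for word, cnt in freq.items():
--         if cnt < 0:
--             raise ValueError("Частота не может быть отрицательной")
--         buckets.setdefault(cnt, []).append(word)
--     return [(w, c) for c in sorted(buckets, reverse=True) for w in sorted(buckets[c])]
-- ===== Notes on version B (the rewrite author's own statement) =====
-- stated objective: alternative
-- what changed: Replaces the single composite-key sort over (-count, word) tuples by a count-bucket grouping: one pass builds a dict count -> words, counts are iterated in descending order and each bucket's words are sorted ascending.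
import Mathlib
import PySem

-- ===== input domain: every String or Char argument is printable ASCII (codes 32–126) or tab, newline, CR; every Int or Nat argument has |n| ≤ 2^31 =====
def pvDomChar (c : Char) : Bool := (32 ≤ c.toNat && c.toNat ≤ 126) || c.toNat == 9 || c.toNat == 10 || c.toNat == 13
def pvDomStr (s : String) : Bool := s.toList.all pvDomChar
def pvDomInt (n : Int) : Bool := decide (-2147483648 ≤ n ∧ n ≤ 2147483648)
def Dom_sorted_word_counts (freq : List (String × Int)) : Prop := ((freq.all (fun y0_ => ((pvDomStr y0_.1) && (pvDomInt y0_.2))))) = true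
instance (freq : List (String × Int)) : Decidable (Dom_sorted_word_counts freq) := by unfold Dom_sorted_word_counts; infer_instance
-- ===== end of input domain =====

-- B replaces A's single composite-key sort (-count, word) by a count-bucket grouping (dict count -> words,
-- counts descending, words ascending inside each bucket); a different data representation of the same O(n log n) task (objective: alternative).

-- ===== PORT A =====
-- A raises ValueError on an empty dict and on a negative count; those inputs are outside Pre_ below
-- and the port returns [] there (unreachable under Pre_). The isinstance checks are vacuous under the
-- type convention (keys are String, values Int) and have no Lean counterpart.
def sorted_word_counts (freq : List (String × Int)) : List (String × Int) :=
  if freq = [] then []                                   -- raise ValueError (empty)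
  else if freq.any (fun kv => decide (kv.2 < 0)) then [] -- raise ValueError (negative)
  else PySem.List.sorted2 freq (fun kv => -kv.2) (fun kv => kv.1) false

-- ===== PORT B =====
-- buckets.setdefault(cnt, []).append(word)  ==  buckets[cnt] = buckets.get(cnt, []) + [word]  ==  Dict.modify
def swcBuckets (freq : List (String × Int)) : PySem.Dict Int (List String) :=
  freq.foldl (fun d kv => d.modify kv.2 [] (fun ws => ws ++ [kv.1])) PySem.Dict.empty

def sorted_word_counts_alt (freq : List (String × Int)) : List (String × Int) :=
  if freq = [] then []                                   -- raise ValueError (empty)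
  else if freq.any (fun kv => decide (kv.2 < 0)) then [] -- raise ValueError (negative)
  else
    let buckets := swcBuckets freq
    (PySem.List.sorted buckets.keys (fun c => c) true).flatMap
      (fun c => (PySem.List.sorted (buckets.getD c []) (fun w => w) false).map (fun w => (w, c)))

-- ===== PRECONDITION & SPEC =====
-- Pre_ excludes: the empty dict and dicts with a negative count (A raises ValueError on both), and
-- association lists with duplicate keys, which cannot arise from the dict[str, int] argument A takes.
def Pre_sorted_word_counts (freq : List (String × Int)) : Prop :=
  freq ≠ [] ∧ (∀ kv ∈ freq, 0 ≤ kv.2) ∧ (freq.map (fun kv => kv.1)).Nodup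
instance (freq : List (String × Int)) : Decidable (Pre_sorted_word_counts freq) := by
  unfold Pre_sorted_word_counts; infer_instance
def pvWitness_sorted_word_counts : (List (String × Int)) := [("b", 2), ("a", 1)]

def Spec_sorted_word_counts (freq : List (String × Int)) (out : List (String × Int)) : Prop := out = sorted_word_counts_alt freq
instance (freq : List (String × Int)) (out : List (String × Int)) : Decidable (Spec_sorted_word_counts freq out) := by unfold Spec_sorted_word_counts; infer_instance

-- ===== CLAIM (what is proved, stated in full; the proofs are below) =====
def Claim_equal_sorted_word_counts : Prop := ∀ (freq : List (String × Int)), Dom_sorted_word_counts freq → Pre_sorted_word_counts freq → Spec_sorted_word_counts freq (sorted_word_counts freq)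

-- ===== LEMMAS AND PROOFS =====

-- A's composite key (-count, word) as a single lexicographic key
def swcKey (kv : String × Int) : Lex (Int × String) := toLex (-kv.2, kv.1)

theorem swc_before_eq (a b : String × Int) :
    (decide (-a.2 < -b.2) || !decide (-b.2 < -a.2) && decide (a.1 < b.1))
      = decide (swcKey a < swcKey b) := by
  simp only [swcKey, Prod.Lex.toLex_lt_toLex]
  rcases lt_trichotomy (-a.2) (-b.2) with h | h | h
  · simp [h]
  · simp [h]
  · have hL : (decide (-a.2 < -b.2) || !decide (-b.2 < -a.2) && decide (a.1 < b.1)) = false := by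
      simp [h]; omega
    have hR : decide (-a.2 < -b.2 ∨ (-a.2 = -b.2 ∧ a.1 < b.1)) = false := by
      simp only [decide_eq_false_iff_not]
      rintro (hc | ⟨he, -⟩) <;> omega
    rw [hL, hR]

-- A's tuple-key sort is the plain sort under the lexicographic key
theorem swc_sorted2_eq_sorted_lex (xs : List (String × Int)) :
    PySem.List.sorted2 xs (fun kv => -kv.2) (fun kv => kv.1) false
      = PySem.List.sorted xs swcKey false := by
  show List.foldl _ [] xs = List.foldl _ [] xs
  simp only [if_neg (by decide : ¬ (false = true))]
  congr 1
  funext acc x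
  congr 1
  funext a b
  exact swc_before_eq a b

-- contents of the grouping loop: bucket c holds the words of freq whose count is c, in order
theorem swc_buckets_getD (freq : List (String × Int)) (d : PySem.Dict Int (List String)) (c : Int) :
    (freq.foldl (fun d kv => d.modify kv.2 [] (fun ws => ws ++ [kv.1])) d).getD c []
      = d.getD c [] ++ (freq.filter (fun kv => kv.2 == c)).map (·.1) := by
  induction freq generalizing d with
  | nil => simp
  | cons x xs ih =>
    simp only [List.foldl_cons, ih, List.filter_cons]
    rw [PySem.Dict.getD_modify]
    by_cases hx : x.2 = c
    · simp [hx]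
    · have h1 : ¬ c = x.2 := fun h => hx h.symm
      have h2 : ¬ (x.2 == c) = true := by simpa using hx
      simp [h1, h2]

-- the bucket keys are exactly the distinct counts, in first-occurrence order
theorem swc_keys (freq : List (String × Int)) :
    (swcBuckets freq).keys = PySem.Set.ofList (freq.map (fun kv => kv.2)) := by
  unfold swcBuckets
  rw [PySem.Dict.keys_foldl_modify_key freq (fun kv => kv.2) [] (fun _ kv => (fun ws => ws ++ [kv.1]))]
  simp [PySem.Set.update, PySem.Set.ofList, PySem.Dict.keys_empty]

-- permutation core: concatenating the filters over a covering nodup list of counts permutes freq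
theorem swc_perm_flatMap_filter (cs : List Int) (l : List (String × Int))
    (hnd : cs.Nodup) (hcov : ∀ kv ∈ l, kv.2 ∈ cs) :
    (cs.flatMap (fun c => l.filter (fun kv => kv.2 == c))).Perm l := by
  induction cs generalizing l with
  | nil =>
    cases l with
    | nil => simp
    | cons x xs => exact absurd (hcov x (by simp)) (by simp)
  | cons c cs ih =>
    have hstep : ∀ c' ∈ cs, l.filter (fun kv => kv.2 == c')
        = (l.filter (fun kv => !(kv.2 == c))).filter (fun kv => kv.2 == c') := by
      intro c' hc'
      rw [List.filter_filter]
      apply List.filter_congr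
      intro kv _
      by_cases h : kv.2 = c'
      · have hne : ¬ c' = c := by rintro rfl; exact (List.nodup_cons.mp hnd).1 hc'
        simp [h]
        exact hne
      · simp [h]
    have hrest : (cs.flatMap (fun c' => l.filter (fun kv => kv.2 == c'))).Perm
        (l.filter (fun kv => !(kv.2 == c))) := by
      rw [List.flatMap_congr hstep]
      apply ih _ (List.nodup_cons.mp hnd).2
      intro kv hkv
      have h1 := List.of_mem_filter hkv
      have h2 := hcov kv (List.mem_of_mem_filter hkv)
      simp at h1
      rcases List.mem_cons.mp h2 with h | h
      · exact absurd h h1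
      · exact h
    have hsplit : (c :: cs).flatMap (fun c => l.filter (fun kv => kv.2 == c))
        = l.filter (fun kv => kv.2 == c) ++ cs.flatMap (fun c' => l.filter (fun kv => kv.2 == c')) := by
      simp [List.flatMap_cons]
    rw [hsplit]
    exact (List.Perm.append_left _ hrest).trans (List.filter_append_perm _ l)

theorem swcKey_lt_same (c : Int) {w w' : String} (h : w < w') : swcKey (w, c) < swcKey (w', c) := by
  simp only [swcKey, Prod.Lex.toLex_lt_toLex]
  exact Or.inr ⟨trivial, h⟩

theorem swcKey_lt_cross {c c' : Int} (h : c' < c) (w w' : String) : swcKey (w, c) < swcKey (w', c') := by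
  simp only [swcKey, Prod.Lex.toLex_lt_toLex]
  exact Or.inl (by omega)

-- ===== VERDICT (by name: the statement is the Claim_ definition above) =====
theorem sorted_word_counts_spec : Claim_equal_sorted_word_counts := by
  intro freq _hdom hpre
  obtain ⟨hne, hpos, hnd⟩ := hpre
  unfold Spec_sorted_word_counts sorted_word_counts sorted_word_counts_alt
  have hany : ¬ (freq.any (fun kv => decide (kv.2 < 0)) = true) := by
    simp only [List.any_eq_true, not_exists]
    intro kv
    rintro ⟨hkv, hlt⟩
    have := hpos kv hkv
    simp at hlt
    omega
  rw [if_neg hne, if_neg hne, if_neg hany, if_neg hany]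
  rw [swc_sorted2_eq_sorted_lex]
  -- name the pieces of B's output
  set cs := PySem.List.sorted (swcBuckets freq).keys (fun c => c) true with hcs
  have hk : (swcBuckets freq).keys = PySem.Set.ofList (freq.map (fun kv => kv.2)) := swc_keys freq
  have hcsnd : cs.Nodup :=
    (PySem.List.sorted_perm (swcBuckets freq).keys (fun c => c) true).symm.nodup
      (hk ▸ PySem.Set.nodup_ofList _)
  have hcsmem : ∀ c : Int, c ∈ cs ↔ c ∈ freq.map (fun kv => kv.2) := by
    intro c
    rw [hcs, PySem.List.mem_sorted, hk, PySem.Set.mem_ofList]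
  have hcsdesc : cs.Pairwise (fun a b => b < a) := by
    have h1 : cs.Pairwise (fun a b : Int => b ≤ a) := PySem.List.sorted_pairwise_rev _ _
    exact (h1.and hcsnd).imp (fun h => lt_of_le_of_ne h.1 (fun he => h.2 he.symm))
  have hbucket : ∀ c : Int, (swcBuckets freq).getD c [] = (freq.filter (fun kv => kv.2 == c)).map (·.1) := by
    intro c
    unfold swcBuckets
    rw [swc_buckets_getD, PySem.Dict.getD_empty, List.nil_append]
  have hwnodup : ∀ c : Int, (PySem.List.sorted ((swcBuckets freq).getD c []) (fun w => w) false).Nodup := by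
    intro c
    apply (PySem.List.sorted_perm ((swcBuckets freq).getD c []) (fun w => w) false).symm.nodup
    rw [hbucket]
    exact List.Nodup.sublist (List.Sublist.map (fun kv : String × Int => kv.1) List.filter_sublist) hnd
  have hwlt : ∀ c : Int, (PySem.List.sorted ((swcBuckets freq).getD c []) (fun w => w) false).Pairwise (· < ·) := by
    intro c
    have h1 := PySem.List.sorted_pairwise ((swcBuckets freq).getD c []) (fun w => w)
    exact (h1.and (hwnodup c)).imp (fun h => lt_of_le_of_ne h.1 h.2)
  apply PySem.List.sorted_eq_of_perm_of_pairwise_lt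
  · -- permutation
    have hblock : ∀ c ∈ cs,
        ((PySem.List.sorted ((swcBuckets freq).getD c []) (fun w => w) false).map (fun w => (w, c))).Perm
          (freq.filter (fun kv => kv.2 == c)) := by
      intro c _
      have h1 : ((PySem.List.sorted ((swcBuckets freq).getD c []) (fun w => w) false).map (fun w => (w, c))).Perm
          (((swcBuckets freq).getD c []).map (fun w => (w, c))) :=
        List.Perm.map _ (PySem.List.sorted_perm _ _ _)
      have h2 : ((swcBuckets freq).getD c []).map (fun w => (w, c))
          = freq.filter (fun kv => kv.2 == c) := by
        rw [hbucket, List.map_map]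
        have : ∀ kv ∈ freq.filter (fun kv => kv.2 == c),
            ((fun w => (w, c)) ∘ (fun kv : String × Int => kv.1)) kv = id kv := by
          intro kv hkv
          have h := List.of_mem_filter hkv
          simp only [beq_iff_eq] at h
          simp only [Function.comp, id_eq]
          rw [← h]
        rw [List.map_congr_left this, List.map_id]
      exact h1.trans (h2 ▸ List.Perm.refl _)
    have hcov : ∀ kv ∈ freq, kv.2 ∈ cs := by
      intro kv hkv
      exact (hcsmem kv.2).mpr (List.mem_map.mpr ⟨kv, hkv, rfl⟩)
    exact (List.Perm.flatMap_left cs hblock).trans (swc_perm_flatMap_filter cs freq hcsnd hcov)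
  · -- strict lexicographic order of B's output
    rw [List.pairwise_flatMap]
    constructor
    · intro c _
      rw [List.pairwise_map]
      exact (hwlt c).imp (fun hlt => swcKey_lt_same _ hlt)
    · exact hcsdesc.imp (fun hlt x hx y hy => by
        obtain ⟨wx, -, rfl⟩ := List.mem_map.mp hx
        obtain ⟨wy, -, rfl⟩ := List.mem_map.mp hy
        exact swcKey_lt_cross hlt wx wy)
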